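-- pv_equiv track=rewrite | github.com/HerryTech/Mini-Python-Projects | Guess the number/guess_number.py | getClue
-- ===== SOURCE A (Python) =====
-- def getClue(guess, secretNumber):
--     clue = []
--     for i in range(len(guess)):
--        if guess[i] == secretNumber[i] :
--            clue.append("RR")
--        elif guess[i] in secretNumber:
--            clue.append("RW")
--        else:
--            clue.append("WW")
--     clue.sort()
--     return " ".join(clue)
-- ===== SOURCE B (Python) =====
-- def getClue(guess, secretNumber):
--     rr = rw = ww = 0
--     for i in range(len(guess)):
--         if guess[i] == secretNumber[i]:
--             rr += 1
--         elif guess[i] in secretNumber: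
--             rw += 1
--         else:
--             ww += 1
--     return " ".join(["RR"] * rr + ["RW"] * rw + ["WW"] * ww)
-- ===== Notes on version B (the rewrite author's own statement) =====
-- stated objective: simpler
-- what changed: Replaces list-append-then-comparison-sort with three integer counters and a direct bucketed emission (['RR']*rr + ['RW']*rw + ['WW']*ww), exploiting the fixed sorted order of the three codes.
import Mathlib
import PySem

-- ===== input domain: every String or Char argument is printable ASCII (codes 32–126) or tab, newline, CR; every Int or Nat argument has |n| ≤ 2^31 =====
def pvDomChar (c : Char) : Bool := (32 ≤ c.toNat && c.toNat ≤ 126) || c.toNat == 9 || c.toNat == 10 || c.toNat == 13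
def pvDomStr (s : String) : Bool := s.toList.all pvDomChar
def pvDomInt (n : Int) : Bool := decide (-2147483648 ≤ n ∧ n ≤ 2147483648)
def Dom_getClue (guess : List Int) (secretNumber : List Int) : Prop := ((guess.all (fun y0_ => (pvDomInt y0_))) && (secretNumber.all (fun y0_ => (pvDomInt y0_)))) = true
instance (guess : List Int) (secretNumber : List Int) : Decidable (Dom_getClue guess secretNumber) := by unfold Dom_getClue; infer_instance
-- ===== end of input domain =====

-- B replaces A's append-then-sort with three counters and a direct bucketed emission (simpler; same loop and indexing, so it raises exactly where A does).

-- ===== PORT A =====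
def getClue (guess : List Int) (secretNumber : List Int) : String :=
  let clue : List String :=
    (PySem.List.pyRange 0 guess.length 1).foldl
      (fun clue i =>
        if PySem.List.pyGetD guess i 0 = PySem.List.pyGetD secretNumber i 0 then clue ++ ["RR"]
        else if PySem.List.pyGetD guess i 0 ∈ secretNumber then clue ++ ["RW"]
        else clue ++ ["WW"]) []
  PySem.Str.join " " (PySem.List.sorted clue (fun x => x) false)

-- ===== PORT B =====
def getClue_alt (guess : List Int) (secretNumber : List Int) : String :=
  let c : Nat × Nat × Nat :=
    (PySem.List.pyRange 0 guess.length 1).foldl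
      (fun (c : Nat × Nat × Nat) i =>
        if PySem.List.pyGetD guess i 0 = PySem.List.pyGetD secretNumber i 0 then (c.1 + 1, c.2.1, c.2.2)
        else if PySem.List.pyGetD guess i 0 ∈ secretNumber then (c.1, c.2.1 + 1, c.2.2)
        else (c.1, c.2.1, c.2.2 + 1)) (0, 0, 0)
  PySem.Str.join " "
    (List.replicate c.1 "RR" ++ List.replicate c.2.1 "RW" ++ List.replicate c.2.2 "WW")

-- ===== PRECONDITION & SPEC =====
-- A indexes secretNumber[i] for every i < len(guess): it raises IndexError when guess is longer than secretNumber (B raises there too).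
def Pre_getClue (guess : List Int) (secretNumber : List Int) : Prop := guess.length ≤ secretNumber.length
instance (guess : List Int) (secretNumber : List Int) : Decidable (Pre_getClue guess secretNumber) := by unfold Pre_getClue; infer_instance
def pvWitness_getClue : List Int × List Int := ([1, 2, 3], [3, 2, 4])

def Spec_getClue (guess : List Int) (secretNumber : List Int) (out : String) : Prop := out = getClue_alt guess secretNumber
instance (guess : List Int) (secretNumber : List Int) (out : String) : Decidable (Spec_getClue guess secretNumber out) := by unfold Spec_getClue; infer_instance

-- ===== CLAIM (what is proved, stated in full; the proofs are below) =====
def Claim_equal_getClue : Prop := ∀ (guess : List Int) (secretNumber : List Int), Dom_getClue guess secretNumber → Pre_getClue guess secretNumber → Spec_getClue guess secretNumber (getClue guess secretNumber)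

-- ===== LEMMAS AND PROOFS =====

-- The per-index tag A appends (and B classifies by).
def pvTag (guess : List Int) (secretNumber : List Int) (i : Int) : String :=
  if PySem.List.pyGetD guess i 0 = PySem.List.pyGetD secretNumber i 0 then "RR"
  else if PySem.List.pyGetD guess i 0 ∈ secretNumber then "RW"
  else "WW"

lemma pvTag_mem (guess secretNumber : List Int) (i : Int) :
    pvTag guess secretNumber i = "RR" ∨ pvTag guess secretNumber i = "RW" ∨ pvTag guess secretNumber i = "WW" := by
  unfold pvTag
  split_ifs <;> simp

-- A's loop builds the map of pvTag over the index range.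
lemma pvA_clue (guess secretNumber : List Int) (l : List Int) :
    l.foldl
      (fun clue i =>
        if PySem.List.pyGetD guess i 0 = PySem.List.pyGetD secretNumber i 0 then clue ++ ["RR"]
        else if PySem.List.pyGetD guess i 0 ∈ secretNumber then clue ++ ["RW"]
        else clue ++ ["WW"]) [] = l.map (pvTag guess secretNumber) := by
  have h : (fun (clue : List String) i =>
        if PySem.List.pyGetD guess i 0 = PySem.List.pyGetD secretNumber i 0 then clue ++ ["RR"]
        else if PySem.List.pyGetD guess i 0 ∈ secretNumber then clue ++ ["RW"]
        else clue ++ ["WW"]) = fun clue i => clue ++ [pvTag guess secretNumber i] := by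
    funext clue i
    unfold pvTag
    split_ifs <;> rfl
  rw [h]
  simpa using PySem.List.foldl_append_singleton_eq_map (pvTag guess secretNumber) l []

-- B's step, expressed through the tag.
lemma pvB_step_eq (guess secretNumber : List Int) :
    (fun (c : Nat × Nat × Nat) i =>
        if PySem.List.pyGetD guess i 0 = PySem.List.pyGetD secretNumber i 0 then (c.1 + 1, c.2.1, c.2.2)
        else if PySem.List.pyGetD guess i 0 ∈ secretNumber then (c.1, c.2.1 + 1, c.2.2)
        else (c.1, c.2.1, c.2.2 + 1))
    = fun (c : Nat × Nat × Nat) i =>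
        if pvTag guess secretNumber i = "RR" then (c.1 + 1, c.2.1, c.2.2)
        else if pvTag guess secretNumber i = "RW" then (c.1, c.2.1 + 1, c.2.2)
        else (c.1, c.2.1, c.2.2 + 1) := by
  funext c i
  unfold pvTag
  split_ifs <;> simp_all

-- B's loop counts the three tags.
lemma pvB_counts (guess secretNumber : List Int) (l : List Int) (a b c : Nat) :
    l.foldl
      (fun (c : Nat × Nat × Nat) i =>
        if pvTag guess secretNumber i = "RR" then (c.1 + 1, c.2.1, c.2.2)
        else if pvTag guess secretNumber i = "RW" then (c.1, c.2.1 + 1, c.2.2)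
        else (c.1, c.2.1, c.2.2 + 1)) (a, b, c)
    = (a + (l.map (pvTag guess secretNumber)).count "RR",
       b + (l.map (pvTag guess secretNumber)).count "RW",
       c + (l.map (pvTag guess secretNumber)).count "WW") := by
  induction l generalizing a b c with
  | nil => simp
  | cons x t ih =>
      simp only [List.foldl_cons, List.map_cons, List.count_cons]
      rcases pvTag_mem guess secretNumber x with h | h | h <;> simp [h, ih] <;> omega

-- Any list over {RR, RW, WW} is a permutation of its bucketed form.
lemma pvPerm (m : List String) (hm : ∀ x ∈ m, x = "RR" ∨ x = "RW" ∨ x = "WW") :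
    m.Perm (List.replicate (m.count "RR") "RR" ++ List.replicate (m.count "RW") "RW"
            ++ List.replicate (m.count "WW") "WW") := by
  induction m with
  | nil => simp
  | cons hd t ih =>
      have ht : ∀ y ∈ t, y = "RR" ∨ y = "RW" ∨ y = "WW" := fun y hy => hm y (List.mem_cons_of_mem _ hy)
      have ihx := ih ht
      have hhd : hd = "RR" ∨ hd = "RW" ∨ hd = "WW" := hm hd (by simp)
      rcases hhd with hx | hx | hx <;> subst hx
      · simp only [List.count_cons_self, List.count_cons]
        rw [List.replicate_succ]
        simpa using (List.Perm.cons "RR" ihx)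
      · simp only [List.count_cons_self, List.count_cons]
        rw [List.replicate_succ]
        refine (List.Perm.cons "RW" ihx).trans ?_
        simpa using (List.perm_middle
          (a := "RW") (l₁ := List.replicate (t.count "RR") "RR")
          (l₂ := List.replicate (t.count "RW") "RW" ++ List.replicate (t.count "WW") "WW")).symm
      · simp only [List.count_cons_self, List.count_cons]
        rw [List.replicate_succ]
        refine (List.Perm.cons "WW" ihx).trans ?_
        simpa [List.append_assoc] using (List.perm_middle
          (a := "WW")
          (l₁ := List.replicate (t.count "RR") "RR" ++ List.replicate (t.count "RW") "RW")
          (l₂ := List.replicate (t.count "WW") "WW")).symm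

-- The bucketed form is ≤-sorted.
lemma pvPairwise (a b c : Nat) :
    (List.replicate a "RR" ++ List.replicate b "RW" ++ List.replicate c "WW").Pairwise
      (fun x y : String => x ≤ y) := by
  refine List.pairwise_append.2 ⟨List.pairwise_append.2 ⟨?_, ?_, ?_⟩, ?_, ?_⟩
  · exact List.pairwise_replicate.2 (Or.inr le_rfl)
  · exact List.pairwise_replicate.2 (Or.inr le_rfl)
  · intro x hx y hy
    rw [List.eq_of_mem_replicate hx, List.eq_of_mem_replicate hy, String.le_iff_toList_le]; decide
  · exact List.pairwise_replicate.2 (Or.inr le_rfl)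
  · intro x hx y hy
    rcases List.mem_append.1 hx with h | h <;>
      rw [List.eq_of_mem_replicate h, List.eq_of_mem_replicate hy, String.le_iff_toList_le] <;> decide

-- ===== VERDICT (by name: the statement is the Claim_ definition above) =====
theorem getClue_spec : Claim_equal_getClue := by
  intro guess secretNumber _ _
  unfold Spec_getClue getClue getClue_alt
  dsimp only
  rw [pvA_clue, pvB_step_eq, pvB_counts]
  have hmem : ∀ x ∈ (PySem.List.pyRange 0 guess.length 1).map (pvTag guess secretNumber),
      x = "RR" ∨ x = "RW" ∨ x = "WW" := by
    intro x hx
    rcases List.mem_map.1 hx with ⟨i, _, rfl⟩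
    exact pvTag_mem guess secretNumber i
  simp only [Nat.zero_add]
  rw [PySem.List.sorted_id_eq_of_perm_of_pairwise _ _ (pvPerm _ hmem).symm (pvPairwise _ _ _)]
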